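-- pv_equiv track=rewrite | github.com/iam-rajesh-patnala/Programming-Foundations | IDP Prep Series Level - 1/Bulb states pattern.py | get_bulb_status
-- ===== SOURCE A (Python) =====
-- def update_bulb_status(bulb_status):
--     current_bulb_status =[]
--     for each_bulb in bulb_status:
--         if each_bulb == 1:
--             current_bulb_status.append(0)
--         else:
--             current_bulb_status.append(1)
--     return current_bulb_status
--
-- def get_initial_bulb_status(rows_count):
--     initial_bulb_status = []
--
--     for i in range(rows_count):
--         if i % 2 == 0:
--             initial_bulb_status.append(1)
--         else:
--             initial_bulb_status.append(0)
--
--     return initial_bulb_status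
--
-- def get_bulb_status(rows_count):
--     bulbs_on_off_status = []
--     no_of_visits = rows_count
--
--     initial_bulb_status = get_initial_bulb_status(rows_count)
--     previous_bulb_on_of_status = initial_bulb_status
--     bulbs_on_off_status.append(previous_bulb_on_of_status)
--
--     for i in range(1, no_of_visits):
--         current_bulb_on_of_status = update_bulb_status(previous_bulb_on_of_status)
--         bulbs_on_off_status.append(current_bulb_on_of_status)
--         previous_bulb_on_of_status = current_bulb_on_of_status
--
--     return bulbs_on_off_status
-- ===== SOURCE B (Python) =====
-- def get_bulb_status(rows_count):
--     return [[1 if (i + j) % 2 == 0 else 0 for j in range(rows_count)]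
--             for i in range(rows_count)]
-- ===== Notes on version B (the rewrite author's own statement) =====
-- stated objective: simpler
-- what changed: Replaced the helper chain that builds an initial row and repeatedly toggles a threaded previous-row state with a single comprehension computing each cell independently from the closed-form parity (i+j) % 2.
-- intended difference: For rows_count = 0 A returns [[]] (it unconditionally appends the empty initial row), while B returns [], the intended zero-row pattern. — e.g. on get_bulb_status(0): A returns [[]], B returns []
-- outside the precondition, e.g. on get_bulb_status(-1): A returns [[]], B returns []; on get_bulb_status(-5): A returns [[]], B returns []
import Mathlib
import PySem

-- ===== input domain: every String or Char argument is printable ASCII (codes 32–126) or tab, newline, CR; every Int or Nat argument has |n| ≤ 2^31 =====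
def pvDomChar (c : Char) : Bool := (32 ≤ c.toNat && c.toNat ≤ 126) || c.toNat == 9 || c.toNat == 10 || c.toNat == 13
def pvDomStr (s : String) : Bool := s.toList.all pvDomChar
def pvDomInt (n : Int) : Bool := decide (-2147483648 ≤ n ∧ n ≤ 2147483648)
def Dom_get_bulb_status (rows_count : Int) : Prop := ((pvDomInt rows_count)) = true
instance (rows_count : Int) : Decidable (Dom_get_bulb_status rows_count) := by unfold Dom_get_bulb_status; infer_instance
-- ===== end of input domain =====

-- B (Source B) is a single parity comprehension; A threads a previous-row state through repeated toggling.

-- ===== PORT A =====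
-- helper update_bulb_status: loop appending the flipped bulb
def pvUpdateBulbStatus (bulb_status : List Int) : List Int :=
  bulb_status.foldl (fun acc b => acc ++ [if b == 1 then 0 else 1]) []

-- helper get_initial_bulb_status: loop over range(rows_count) appending by parity of i
def pvInitialBulbStatus (rows_count : Int) : List Int :=
  (PySem.List.pyRange 0 rows_count 1).foldl
    (fun acc i => acc ++ [if PySem.Int.mod i 2 == 0 then 1 else 0]) []

def get_bulb_status (rows_count : Int) : List (List Int) :=
  let initial := pvInitialBulbStatus rows_count
  let st :=
    (PySem.List.pyRange 1 rows_count 1).foldl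
      (fun (st : List (List Int) × List Int) _ =>
        let cur := pvUpdateBulbStatus st.2
        (st.1 ++ [cur], cur))
      ([initial], initial)
  st.1

-- ===== PORT B =====
def get_bulb_status_alt (rows_count : Int) : List (List Int) :=
  (PySem.List.pyRange 0 rows_count 1).map (fun i =>
    (PySem.List.pyRange 0 rows_count 1).map (fun j =>
      if PySem.Int.mod (i + j) 2 == 0 then 1 else 0))

-- ===== PRECONDITION & SPEC =====
-- Pre_ excludes negative row counts: a row count is naturally nonnegative, and A's [[]] there
-- (like at 0) is an artefact of appending the empty initial row unconditionally.
def Pre_get_bulb_status (rows_count : Int) : Prop := 0 ≤ rows_count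
instance (rows_count : Int) : Decidable (Pre_get_bulb_status rows_count) := by unfold Pre_get_bulb_status; infer_instance
def pvWitness_get_bulb_status : Int := 3

-- For rows_count = 0 A returns [[]] (it unconditionally appends the empty initial row),
-- while B returns [], the intended zero-row pattern.
def D_get_bulb_status (rows_count : Int) : Prop := rows_count = 0
instance (rows_count : Int) : Decidable (D_get_bulb_status rows_count) := by unfold D_get_bulb_status; infer_instance

def Spec_get_bulb_status (rows_count : Int) (out : List (List Int)) : Prop :=
  ¬ D_get_bulb_status rows_count → out = get_bulb_status_alt rows_count
instance (rows_count : Int) (out : List (List Int)) : Decidable (Spec_get_bulb_status rows_count out) := by unfold Spec_get_bulb_status; infer_instance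

def pvDiffWitness_get_bulb_status : Int := 0
def pvDiffWitnessOut_get_bulb_status : (List (List Int)) × (List (List Int)) := ([[]], [])

-- ===== CLAIM (what is proved, stated in full; the proofs are below) =====
def Claim_unchanged_get_bulb_status : Prop := ∀ (rows_count : Int), Dom_get_bulb_status rows_count → Pre_get_bulb_status rows_count → Spec_get_bulb_status rows_count (get_bulb_status rows_count)
def Claim_changed_get_bulb_status : Prop := Dom_get_bulb_status (pvDiffWitness_get_bulb_status) ∧ Pre_get_bulb_status (pvDiffWitness_get_bulb_status) ∧ D_get_bulb_status (pvDiffWitness_get_bulb_status) ∧ get_bulb_status (pvDiffWitness_get_bulb_status) = pvDiffWitnessOut_get_bulb_status.1 ∧ get_bulb_status_alt (pvDiffWitness_get_bulb_status) = pvDiffWitnessOut_get_bulb_status.2 ∧ pvDiffWitnessOut_get_bulb_status.1 ≠ pvDiffWitnessOut_get_bulb_status.2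
def Claim_exact_get_bulb_status : Prop := ∀ (rows_count : Int), Dom_get_bulb_status rows_count → Pre_get_bulb_status rows_count → D_get_bulb_status rows_count → get_bulb_status rows_count ≠ get_bulb_status_alt rows_count

-- ===== LEMMAS AND PROOFS =====

-- B's row i, as a function of i
def pvRow (n i : Int) : List Int :=
  (PySem.List.pyRange 0 n 1).map (fun j => if PySem.Int.mod (i + j) 2 == 0 then 1 else 0)

lemma pvUpdate_eq_map (bs : List Int) :
    pvUpdateBulbStatus bs = bs.map (fun b => if b == 1 then 0 else 1) := by
  simpa [pvUpdateBulbStatus] using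
    PySem.List.foldl_append_singleton_eq_map (fun b : Int => if b == 1 then 0 else 1) bs []

lemma pvUpdate_row (n i : Int) : pvUpdateBulbStatus (pvRow n i) = pvRow n (i + 1) := by
  simp only [pvUpdate_eq_map, pvRow, List.map_map]
  refine List.map_congr_left (fun j hj => ?_)
  have h2 : (0:Int) < 2 := by norm_num
  simp only [Function.comp, PySem.Int.mod_eq_emod_of_pos h2]
  have := Int.emod_emod_of_dvd (i + j) (dvd_refl 2)
  by_cases h : (i + j) % 2 = 0 <;> simp [h] <;> omega

lemma pvInitial_eq_row (n : Int) : pvInitialBulbStatus n = pvRow n 0 := by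
  simp only [pvInitialBulbStatus, pvRow]
  rw [PySem.List.foldl_append_singleton_eq_map (fun i : Int => if PySem.Int.mod i 2 == 0 then 1 else 0) _ []]
  exact (List.nil_append _).trans (List.map_congr_left (fun i _ => by norm_num))

-- A's fold over the range: the visited elements are irrelevant, rows accumulate pvUpdate iterates
lemma pv_loop (n : Int) : ∀ (l : List Int) (acc : List (List Int)) (i : Int),
    (l.foldl (fun (st : List (List Int) × List Int) _ =>
        (st.1 ++ [pvUpdateBulbStatus st.2], pvUpdateBulbStatus st.2)) (acc, pvRow n i))
      = (acc ++ (PySem.List.pyRange (i + 1) (i + 1 + l.length) 1).map (pvRow n),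
         pvRow n (i + l.length)) := by
  intro l
  induction l with
  | nil => intro acc i; simp [PySem.List.pyRange_one_eq_nil (le_refl (i+1))]
  | cons x xs ih =>
      intro acc i
      simp only [List.foldl_cons, pvUpdate_row n i]
      rw [ih (acc ++ [pvRow n (i+1)]) (i+1), List.length_cons]
      have hc : PySem.List.pyRange (i+1) (i+1+((xs.length : Int)+1)) 1
          = (i+1) :: PySem.List.pyRange ((i+1)+1) (i+1+((xs.length : Int)+1)) 1 :=
        PySem.List.pyRange_one_cons (by omega)
      push_cast
      have h1 : i+1+1+(xs.length:Int) = i+1+((xs.length:Int)+1) := by ring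
      have h2 : i+1+(xs.length:Int) = i+((xs.length:Int)+1) := by ring
      rw [hc, List.map_cons, h1, h2]
      simp

lemma pv_A_eq_rows (n : Int) (hn : 0 < n) :
    get_bulb_status n = (PySem.List.pyRange 0 n 1).map (pvRow n) := by
  unfold get_bulb_status
  rw [pvInitial_eq_row]
  have hlen : ((PySem.List.pyRange 1 n 1).length : Int) = n - 1 := by
    rw [PySem.List.length_pyRange_one 1 n]; omega
  have hloop := pv_loop n (PySem.List.pyRange 1 n 1) [pvRow n 0] 0
  simp only [hloop, hlen]
  have hc : PySem.List.pyRange 0 n 1 = 0 :: PySem.List.pyRange 1 n 1 :=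
    PySem.List.pyRange_one_cons hn
  have e2 : (0:Int)+1+(n-1) = n := by omega
  have e1 : (0:Int)+1 = 1 := by norm_num
  rw [hc, List.map_cons, List.singleton_append, e2, e1]

-- ===== VERDICT (by name: the statement is the Claim_ definition above) =====
theorem get_bulb_status_spec : Claim_unchanged_get_bulb_status := by
  intro n _ hPre hD
  have hn : 0 < n := by
    unfold D_get_bulb_status at hD; unfold Pre_get_bulb_status at hPre; omega
  rw [pv_A_eq_rows n hn]
  rfl

theorem get_bulb_status_changed : Claim_changed_get_bulb_status := by
  unfold Claim_changed_get_bulb_status; decide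

theorem get_bulb_status_tight : Claim_exact_get_bulb_status := by
  intro n _ _ hD
  unfold D_get_bulb_status at hD
  subst hD
  decide
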